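-- pv_equiv track=rewrite | github.com/rlfordon/hallucination-game | scripts/parse_brief.py | collapse_double_spacing
-- ===== SOURCE A (Python) =====
-- def collapse_double_spacing(text):
--     """Collapse double-spaced lines (blank line between every text line)."""
--     lines = text.split('\n')
--     result = []
--     i = 0
--     while i < len(lines):
--         line = lines[i]
--         if line.strip():
--             result.append(line)
--         elif i + 1 < len(lines) and lines[i + 1].strip():
--             # Blank line between text lines - skip it (double spacing)
--             pass
--         else:
--             result.append(line)
--         i += 1
--     return '\n'.join(result)
-- ===== SOURCE B (Python) =====
-- def collapse_double_spacing(text):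
--     """Collapse double-spaced lines (blank line between every text line)."""
--     pending = None
--     result = []
--     for line in text.split('\n'):
--         if line.strip():
--             pending = None
--             result.append(line)
--         else:
--             if pending is not None:
--                 result.append(pending)
--             pending = line
--     if pending is not None:
--         result.append(pending)
--     return '\n'.join(result)
-- ===== Notes on version B (the rewrite author's own statement) =====
-- stated objective: simpler
-- what changed: Replaced A's index-based while loop that looks ahead at lines[i+1] to decide whether to keep a blank line with a single forward pass carrying a pending-blank holder that is flushed when another blank (or end of input) follows and discarded when text follows.
import Mathlib
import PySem

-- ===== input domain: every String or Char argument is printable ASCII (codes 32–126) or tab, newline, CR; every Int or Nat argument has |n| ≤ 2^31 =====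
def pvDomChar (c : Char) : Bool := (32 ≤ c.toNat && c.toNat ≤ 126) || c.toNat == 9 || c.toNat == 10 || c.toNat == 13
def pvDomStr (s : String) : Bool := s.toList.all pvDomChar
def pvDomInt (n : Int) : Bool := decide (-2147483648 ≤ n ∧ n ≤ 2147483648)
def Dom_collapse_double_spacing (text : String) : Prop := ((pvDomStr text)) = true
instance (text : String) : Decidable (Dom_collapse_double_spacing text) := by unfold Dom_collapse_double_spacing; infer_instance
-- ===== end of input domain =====

-- B replaces A's index-based while loop with lookahead (lines[i+1]) by a single
-- forward pass carrying a pending-blank holder; objective: simpler decomposition, same cost.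


-- ===== PORT A =====
-- A's while loop over indices with lookahead lines[i+1], transcribed as recursion
-- on the suffix (the lookahead is the head of the remaining list).
def pvALoop : List String → List String
  | [] => []
  | l :: rest =>
    if PySem.Str.strip l ≠ "" then
      l :: pvALoop rest
    else
      match rest with
      | next :: _ =>
        if PySem.Str.strip next ≠ "" then pvALoop rest else l :: pvALoop rest
      | [] => l :: pvALoop rest

def collapse_double_spacing (text : String) : String :=
  PySem.Str.join "\n" (pvALoop (((PySem.Str.split? text "\n").getD [])))

-- ===== PORT B =====
-- B's single forward pass with a pending-blank holder (Source B's loop, state = pending).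
def pvBLoop : Option String → List String → List String
  | pending, [] => match pending with | none => [] | some b => [b]
  | pending, l :: rest =>
    if PySem.Str.strip l ≠ "" then
      l :: pvBLoop none rest
    else
      match pending with
      | none => pvBLoop (some l) rest
      | some b => b :: pvBLoop (some l) rest

def collapse_double_spacing_alt (text : String) : String :=
  PySem.Str.join "\n" (pvBLoop none (((PySem.Str.split? text "\n").getD [])))

-- ===== PRECONDITION & SPEC =====
def Spec_collapse_double_spacing (text : String) (out : String) : Prop := out = collapse_double_spacing_alt text
instance (text : String) (out : String) : Decidable (Spec_collapse_double_spacing text out) := by unfold Spec_collapse_double_spacing; infer_instance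

-- ===== CLAIM (what is proved, stated in full; the proofs are below) =====
def Claim_equal_collapse_double_spacing : Prop := ∀ (text : String), Dom_collapse_double_spacing text → Spec_collapse_double_spacing text (collapse_double_spacing text)

-- ===== LEMMAS AND PROOFS =====
theorem pvLoop_agree (xs : List String) :
    pvBLoop none xs = pvALoop xs ∧
    ∀ b, pvBLoop (some b) xs =
      match xs with
      | l :: _ => if PySem.Str.strip l ≠ "" then pvALoop xs else b :: pvALoop xs
      | [] => [b] := by
  induction xs with
  | nil => exact ⟨rfl, fun b => rfl⟩
  | cons l rest ih =>
    obtain ⟨ihn, ihs⟩ := ih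
    by_cases h : PySem.Str.strip l ≠ ""
    · refine ⟨?_, fun b => ?_⟩ <;> simp [pvBLoop, pvALoop, h, ihn]
    · have hA : pvALoop (l :: rest) = l :: pvALoop rest ∨
          (∃ next tl, rest = next :: tl ∧ PySem.Str.strip next ≠ "" ∧
            pvALoop (l :: rest) = pvALoop rest) := by
        cases rest with
        | nil => left; simp [pvALoop, h]
        | cons next tl =>
          by_cases hn : PySem.Str.strip next ≠ ""
          · right; exact ⟨next, tl, rfl, hn, by simp [pvALoop, h, hn]⟩
          · left; simp [pvALoop, h, hn]
      have hsome : pvBLoop (some l) rest = pvALoop (l :: rest) := by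
        rw [ihs l]
        cases rest with
        | nil => simp [pvALoop, h]
        | cons next tl =>
          by_cases hn : PySem.Str.strip next ≠ "" <;>
            simp [pvALoop, h, hn]
      refine ⟨?_, fun b => ?_⟩
      · simp only [pvBLoop, if_neg h]
        exact hsome
      · simp only [pvBLoop, if_neg h]
        rw [hsome]

-- ===== VERDICT (by name: the statement is the Claim_ definition above) =====
theorem collapse_double_spacing_spec : Claim_equal_collapse_double_spacing := by
  intro text _
  unfold Spec_collapse_double_spacing collapse_double_spacing collapse_double_spacing_alt
  rw [(pvLoop_agree _).1]
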